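-- pv_equiv track=rewrite | github.com/mannygaraboa/2024-Codewars | 7kyu/August-2024/Likes-Vs-Dislikes/script.py | like_or_dislike
-- ===== SOURCE A (Python) =====
-- def like_or_dislike(lst):
--     status = 0
--
--     if(lst == []):
--         return "Nothing"
--     else:
--         for i in lst:
--             if(i == "Like"):
--                 if(status == 0 or status == -1):
--                     if(status == 0):
--                         status = status + 1
--                     elif(status == -1):
--                         status = status + 2
--                 elif(status == 1):
--                     status = status - 1
--             elif(i == "Dislike"):
--                 if(status == 0 or status == 1):
--                     if(status == 0):
--                         status = status - 1
--                     elif(status == 1):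
--                         status = status - 2
--                 elif(status == -1):
--                     status = 0
--
--     if(status == 0):
--         return "Nothing"
--     elif(status == 1):
--         return "Like"
--     elif(status == -1):
--         return "Dislike"
-- ===== SOURCE B (Python) =====
-- def like_or_dislike(lst):
--     # Backward scan: the final toggle state is decided solely by the trailing
--     # run of identical relevant actions -- that action if the run is odd, else nothing.
--     last = None
--     k = 0
--     for x in reversed(lst):
--         if x != "Like" and x != "Dislike":
--             continue
--         if last is None:
--             last = x
--         if x != last:
--             break
--         k += 1
--     if last is not None and k % 2 == 1:
--         return last
--     return "Nothing"
-- ===== Notes on version B (the rewrite author's own statement) =====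
-- stated objective: alternative
-- what changed: Replaces A's forward three-state toggle machine with a backward scan: the result is the last relevant action iff its trailing run (ignoring unknown strings) has odd length, else 'Nothing'; the loop breaks as soon as the run ends.
import Mathlib
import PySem

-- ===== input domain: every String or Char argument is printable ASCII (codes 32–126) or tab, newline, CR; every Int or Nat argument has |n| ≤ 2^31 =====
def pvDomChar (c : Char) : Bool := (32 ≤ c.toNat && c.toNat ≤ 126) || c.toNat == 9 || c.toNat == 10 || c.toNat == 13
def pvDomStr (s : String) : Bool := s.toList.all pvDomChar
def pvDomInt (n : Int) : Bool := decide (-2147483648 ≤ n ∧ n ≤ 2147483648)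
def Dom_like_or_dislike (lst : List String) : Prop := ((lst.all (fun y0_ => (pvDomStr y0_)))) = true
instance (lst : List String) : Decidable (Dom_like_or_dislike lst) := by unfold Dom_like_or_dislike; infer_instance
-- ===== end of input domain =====

-- B replaces A's forward three-state machine with a backward scan that inspects only the
-- trailing run of identical relevant actions (odd run → that action, else "Nothing"),
-- exiting early. Objective: alternative.


-- ===== PORT A =====
-- loop body of A's for-loop, transliterated branch for branch
def pvStepA (status : Int) (i : String) : Int :=
  if i == "Like" then
    if status == 0 || status == -1 then
      if status == 0 then status + 1
      else if status == -1 then status + 2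
      else status
    else if status == 1 then status - 1
    else status
  else if i == "Dislike" then
    if status == 0 || status == 1 then
      if status == 0 then status - 1
      else if status == 1 then status - 2
      else status
    else if status == -1 then (0 : Int)
    else status
  else status

def like_or_dislike (lst : List String) : String :=
  if lst == [] then "Nothing"
  else
    let status := lst.foldl pvStepA 0
    if status == 0 then "Nothing"
    else if status == 1 then "Like"
    else if status == -1 then "Dislike"
    else ""  -- Python falls through returning None; unreachable (status ∈ {-1,0,1})

-- ===== PORT B =====
-- B's reversed for-loop with continue/break, as structural recursion over lst.reverse:
-- state (last, k); 'continue' on irrelevant strings, 'break' when the run ends.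
def pvScanB : List String → Option String → Nat → Option String × Nat
  | [], last, k => (last, k)
  | x :: t, last, k =>
    if x ≠ "Like" ∧ x ≠ "Dislike" then pvScanB t last k
    else
      let last' := match last with | none => some x | some l => some l
      if some x ≠ last' then (last', k)
      else pvScanB t last' (k + 1)

def like_or_dislike_alt (lst : List String) : String :=
  let r := pvScanB lst.reverse none 0
  match r.1 with
  | some l => if r.2 % 2 = 1 then l else "Nothing"
  | none => "Nothing"

-- ===== PRECONDITION & SPEC =====
def Spec_like_or_dislike (lst : List String) (out : String) : Prop := out = like_or_dislike_alt lst
instance (lst : List String) (out : String) : Decidable (Spec_like_or_dislike lst out) := by unfold Spec_like_or_dislike; infer_instance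

-- ===== CLAIM (what is proved, stated in full; the proofs are below) =====
def Claim_equal_like_or_dislike : Prop := ∀ (lst : List String), Dom_like_or_dislike lst → Spec_like_or_dislike lst (like_or_dislike lst)

-- ===== LEMMAS AND PROOFS =====

def pvRel (x : String) : Bool := x == "Like" || x == "Dislike"

def pvVal (x : String) : Int := if x == "Like" then 1 else -1

-- A's fold only depends on the relevant actions
theorem pvStepA_irrel (s : Int) (x : String) (hx : pvRel x = false) : pvStepA s x = s := by
  simp [pvRel] at hx
  simp [pvStepA, hx.1, hx.2]

theorem foldl_filter_rel (lst : List String) (s : Int) :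
    lst.foldl pvStepA s = (lst.filter pvRel).foldl pvStepA s := by
  induction lst generalizing s with
  | nil => rfl
  | cons x t ih =>
    by_cases hx : pvRel x
    · simp [hx, List.foldl, ih]
    · simp only [Bool.not_eq_true] at hx
      simp [hx, List.foldl, pvStepA_irrel s x hx, ih]

-- the scan with a fixed last counts the leading run of equal relevant actions
theorem pvScanB_some (m : List String) (x : String) (k : Nat) (hx : pvRel x = true) :
    pvScanB m (some x) k = (some x, k + ((m.filter pvRel).takeWhile (· == x)).length) := by
  induction m generalizing k with
  | nil => rfl
  | cons y t ih =>
    by_cases hy : pvRel y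
    · have hy' : ¬ (y ≠ "Like" ∧ y ≠ "Dislike") := by
        simp [pvRel] at hy; tauto
      by_cases hxy : y = x
      · subst hxy
        simp [pvScanB, hy', hy, ih]
        omega
      · have : some y ≠ some x := by simpa using hxy
        simp [pvScanB, hy', this, hy, hxy]
    · have hy2 : y ≠ "Like" ∧ y ≠ "Dislike" := by
        simp [pvRel] at hy; exact hy
      simp [pvScanB, hy2, hy, ih]

theorem pvScanB_none (m : List String) :
    pvScanB m none 0 =
      match m.filter pvRel with
      | [] => (none, 0)
      | x :: t => (some x, 1 + (t.takeWhile (· == x)).length) := by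
  induction m with
  | nil => rfl
  | cons y t ih =>
    by_cases hy : pvRel y
    · have hy' : ¬ (y ≠ "Like" ∧ y ≠ "Dislike") := by
        simp [pvRel] at hy; tauto
      simp [pvScanB, hy', hy, pvScanB_some t y 1 hy]
    · have hy2 : y ≠ "Like" ∧ y ≠ "Dislike" := by
        simp [pvRel] at hy; exact hy
      simp [pvScanB, hy2, hy, ih]

-- spec of A's state machine on a relevant-only list: trailing-run parity
def pvSpecStatus (r : List String) : Int :=
  match r.reverse with
  | [] => 0
  | x :: t => if (1 + (t.takeWhile (· == x)).length) % 2 = 1 then pvVal x else 0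

theorem pvVal_ne_zero (x : String) : pvVal x ≠ 0 := by
  unfold pvVal; split_ifs <;> decide

theorem pvStepA_rel (s : Int) (hs : s = -1 ∨ s = 0 ∨ s = 1) (x : String) (hx : pvRel x = true) :
    pvStepA s x = if s = pvVal x then 0 else pvVal x := by
  simp [pvRel] at hx
  rcases hx with h | h <;> subst h <;> rcases hs with h | h | h <;> subst h <;> decide

theorem pvSpecStatus_mem (r : List String) :
    pvSpecStatus r = -1 ∨ pvSpecStatus r = 0 ∨ pvSpecStatus r = 1 := by
  unfold pvSpecStatus
  cases r.reverse with
  | nil => simp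
  | cons x t =>
    simp only
    split_ifs
    · unfold pvVal; split_ifs <;> simp
    · simp

theorem pvKey (r : List String) (hr : ∀ x ∈ r, pvRel x = true) :
    r.foldl pvStepA 0 = pvSpecStatus r := by
  induction r using List.reverseRecOn with
  | nil => rfl
  | append_singleton t x ih =>
    have hx : pvRel x = true := hr x (by simp)
    have ht : ∀ y ∈ t, pvRel y = true := fun y hy => hr y (by simp [hy])
    rw [List.foldl_append, List.foldl_cons, List.foldl_nil, ih ht,
      pvStepA_rel _ (by rw [ih ht] at *; exact pvSpecStatus_mem t) x hx]
    conv_lhs => rw [pvSpecStatus]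
    conv_rhs => rw [pvSpecStatus]
    rw [List.reverse_append]
    simp only [List.reverse_cons, List.reverse_nil, List.nil_append, List.cons_append,
      List.nil_append]
    cases htr : t.reverse with
    | nil => simp
    | cons y u =>
      have hy : pvRel y = true := ht y (by
        have : y ∈ t.reverse := by rw [htr]; simp
        simpa using this)
      simp only
      by_cases hxy : y = x
      · subst hxy
        rw [List.takeWhile_cons_of_pos (by simp)]
        simp only [List.length_cons]
        split_ifs <;> first | rfl | omega
      · have hne : pvVal y ≠ pvVal x := by
          simp only [pvRel, Bool.or_eq_true, beq_iff_eq] at hx hy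
          rcases hx with h1 | h1 <;> rcases hy with h2 | h2 <;>
            subst h1 <;> subst h2 <;> first | exact absurd rfl hxy | decide
        rw [List.takeWhile_cons_of_neg (by simpa using hxy)]
        have hv0 := pvVal_ne_zero x
        split_ifs <;> first | rfl | omega | simp_all

theorem pvVal_decode (x : String) (hx : pvRel x = true) :
    (if pvVal x == (0:Int) then "Nothing"
     else if pvVal x == 1 then "Like"
     else if pvVal x == -1 then "Dislike" else "") = x := by
  simp [pvRel] at hx
  rcases hx with h | h <;> subst h <;> decide

-- ===== VERDICT (by name: the statement is the Claim_ definition above) =====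
theorem like_or_dislike_spec : Claim_equal_like_or_dislike := by
  intro lst _
  unfold Spec_like_or_dislike like_or_dislike like_or_dislike_alt
  rw [pvScanB_none, List.filter_reverse]
  rw [foldl_filter_rel]
  have hrel : ∀ x ∈ lst.filter pvRel, pvRel x = true := fun x hx => List.of_mem_filter hx
  rw [pvKey _ hrel]
  unfold pvSpecStatus
  cases hfr : (lst.filter pvRel).reverse with
  | nil =>
    by_cases hnil : lst = [] <;> simp [hnil]
  | cons x t =>
    have hx : pvRel x = true := hrel x (by
      have : x ∈ (lst.filter pvRel).reverse := by rw [hfr]; simp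
      simpa using this)
    have hnil : (lst == []) = false := by
      have h1 : lst.filter pvRel ≠ [] := by
        intro h; rw [h] at hfr; simp at hfr
      have h2 : lst ≠ [] := by intro h; subst h; simp at h1
      simpa using h2
    simp only [hnil, Bool.false_eq_true, if_false]
    by_cases hpar : (1 + (t.takeWhile (· == x)).length) % 2 = 1
    · simp only [hpar, if_true]
      simpa using pvVal_decode x hx
    · simp only [hpar, if_false]
      simp
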